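-- pv_equiv track=rewrite | github.com/noah8368/OmegaZero | scripts/generate_masks.py | get_pawn_front_span_mask
-- ===== SOURCE A (Python) =====
-- __NUM_RANKS = 8
--
-- __NUM_FILES = 8
--
-- def get_bitboard(mask):
--     """Converts a 2D list "mask" into a bitboard."""
--     bitboard_bn = ""
--     for rank in range(__NUM_RANKS):
--         for file in range(__NUM_FILES):
--             if mask[rank][file] == 1:
--                 bitboard_bn = '1' + bitboard_bn
--             else:
--                 bitboard_bn = '0' + bitboard_bn
--     return int(bitboard_bn, 2)
--
-- def get_pawn_front_attackspan_mask(rank, file, color):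
--     """Computes the front attackspans for pawns."""
--     front_attackspan = [[0 for file in range(__NUM_FILES)] for rank in
--                         range(__NUM_RANKS)]
--     rank_dir = 1 if color == "WHITE" else -1
--     start_rank = rank + rank_dir
--     end_rank = __NUM_RANKS if color == "WHITE" else -1
--     for _rank in range(start_rank, end_rank, rank_dir):
--         if file != 0:
--             front_attackspan[_rank][file - 1] = 1
--
--         if file != 7:
--             front_attackspan[_rank][file + 1] = 1
--
--     return get_bitboard(front_attackspan)
--
-- def get_pawn_front_span_mask(rank, file, color):
--     """Computes the front spans for pawns."""
--     front_span = [[0 for file in range(__NUM_FILES)] for rank in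
--                   range(__NUM_RANKS)]
--     rank_dir = 1 if color == "WHITE" else -1
--     start_rank = rank + rank_dir
--     end_rank = __NUM_RANKS if color == "WHITE" else -1
--     for _rank in range(start_rank, end_rank, rank_dir):
--         front_span[_rank][file] = 1
--
--     return (get_bitboard(front_span)
--             | get_pawn_front_attackspan_mask(rank, file, color))
-- ===== SOURCE B (Python) =====
-- def get_pawn_front_span_mask(rank, file, color):
--     """Computes the front spans for pawns."""
--     row = 0
--     for f in (file - 1, file, file + 1):
--         if 0 <= f <= 7:
--             row |= 1 << f
--     if color == "WHITE":
--         lo, hi = rank + 1, 7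
--     else:
--         lo, hi = 0, rank - 1
--     mask = 0
--     for r in range(max(lo, 0), min(hi, 7) + 1):
--         mask |= row << (8 * r)
--     return mask
-- ===== Notes on version B (the rewrite author's own statement) =====
-- stated objective: simpler
-- what changed: Replaces A's two 8x8 zero matrices, cell-by-cell assignments and 64-character binary-string parse (plus a second helper pass for the attack span) with direct bit arithmetic: one 8-bit row mask for the on-board files among file-1..file+1, OR-shifted over the forward ranks in a single ascending loop.
-- intended difference: For files -7..-1 with a non-empty forward-rank loop, A's Python negative indexing wraps around and sets spurious columns (e.g. file -1 marks columns 7, 6 and 0), while B sets only the genuine on-board span columns, which is the intended front-span mask. — e.g. on get_pawn_front_span_mask(5, -1, "WHITE"): A returns 13961440319825248256, B returns 72339069014638592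
import Mathlib
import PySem

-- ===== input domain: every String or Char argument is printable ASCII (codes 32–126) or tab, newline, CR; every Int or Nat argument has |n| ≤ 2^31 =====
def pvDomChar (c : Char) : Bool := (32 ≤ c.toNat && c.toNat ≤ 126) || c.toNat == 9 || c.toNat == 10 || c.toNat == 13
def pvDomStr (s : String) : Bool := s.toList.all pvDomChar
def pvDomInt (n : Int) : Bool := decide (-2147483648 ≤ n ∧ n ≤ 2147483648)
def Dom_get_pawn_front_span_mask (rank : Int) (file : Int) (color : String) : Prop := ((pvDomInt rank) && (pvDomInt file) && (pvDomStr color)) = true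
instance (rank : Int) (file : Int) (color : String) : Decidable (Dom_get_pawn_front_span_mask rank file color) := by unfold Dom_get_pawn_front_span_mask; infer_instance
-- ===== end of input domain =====

-- B drops A's 2D lists and binary-string conversion and computes the mask by bit arithmetic
-- over on-board squares only (objective: simpler); on off-board files A's negative-index
-- wraparound sets spurious columns — see D_ below.

-- ===== PORT A =====
-- [[0]*8]*8 built as in the Python comprehensions
def pvZeros : List (List Int) := (PySem.List.pyRange 0 8 1).map (fun _ => (PySem.List.pyRange 0 8 1).map (fun _ => (0 : Int)))

-- mask[r][f] = v: row lookup then in-place row update; exact for in-range (possibly negative)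
-- indices; out-of-range (Python IndexError) is excluded by Pre_
def pvSet2 (m : List (List Int)) (r f : Int) (v : Int) : List (List Int) :=
  match PySem.List.pyIdx? m.length r with
  | some n => m.set n (PySem.List.pySetD (m.getD n []) f v)
  | none => m

def get_bitboard (mask : List (List Int)) : Int :=
  let bn := (PySem.List.pyRange 0 8 1).foldl (fun bn rank =>
    (PySem.List.pyRange 0 8 1).foldl (fun bn file =>
      if PySem.List.pyGetD (PySem.List.pyGetD mask rank []) file 0 = 1
      then '1' :: bn else '0' :: bn) bn) []
  -- int(bitboard_bn, 2); the loop always yields 64 binary digits, so the parse succeeds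
  (PySem.Int.ofCharsBase? bn 2).getD 0

def get_pawn_front_attackspan_mask (rank : Int) (file : Int) (color : String) : Int :=
  let front := pvZeros
  let rank_dir : Int := if color = "WHITE" then 1 else -1
  let start_rank := rank + rank_dir
  let end_rank : Int := if color = "WHITE" then 8 else -1
  let front := (PySem.List.pyRange start_rank end_rank rank_dir).foldl (fun fr _rank =>
      let fr := if file ≠ 0 then pvSet2 fr _rank (file - 1) 1 else fr
      if file ≠ 7 then pvSet2 fr _rank (file + 1) 1 else fr) front
  get_bitboard front

def get_pawn_front_span_mask (rank : Int) (file : Int) (color : String) : Int :=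
  let front := pvZeros
  let rank_dir : Int := if color = "WHITE" then 1 else -1
  let start_rank := rank + rank_dir
  let end_rank : Int := if color = "WHITE" then 8 else -1
  let front := (PySem.List.pyRange start_rank end_rank rank_dir).foldl (fun fr _rank =>
      pvSet2 fr _rank file 1) front
  PySem.Int.bor (get_bitboard front) (get_pawn_front_attackspan_mask rank file color)

-- ===== PORT B =====
def get_pawn_front_span_mask_alt (rank : Int) (file : Int) (color : String) : Int :=
  let row := [file - 1, file, file + 1].foldl (fun (row : Int) (f : Int) =>
      if 0 ≤ f ∧ f ≤ 7 then PySem.Int.bor row ((1 : Int) <<< f.toNat) else row) 0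
  let lohi : Int × Int := if color = "WHITE" then (rank + 1, 7) else (0, rank - 1)
  -- shifts 1 << f and row << 8*r: exponents are nonnegative in both branches taken
  (PySem.List.pyRange (max lohi.1 0) (min lohi.2 7 + 1) 1).foldl
    (fun mask r => PySem.Int.bor mask (row <<< (8 * r).toNat)) 0

-- ===== PRECONDITION & SPEC =====
-- Pre_ excludes exactly the inputs on which A raises IndexError (a board index below -8 or a
-- file outside [-7,7] while the rank loop is non-empty).
def Pre_get_pawn_front_span_mask (rank : Int) (file : Int) (color : String) : Prop :=
  if color = "WHITE" then 7 ≤ rank ∨ (-9 ≤ rank ∧ -7 ≤ file ∧ file ≤ 7)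
  else rank ≤ 0 ∨ (rank ≤ 8 ∧ -7 ≤ file ∧ file ≤ 7)
instance (rank : Int) (file : Int) (color : String) : Decidable (Pre_get_pawn_front_span_mask rank file color) := by unfold Pre_get_pawn_front_span_mask; infer_instance

def pvWitness_get_pawn_front_span_mask : Int × Int × String := (3, 3, "WHITE")

-- On negative files -7..-1 (with a non-empty rank loop) A returns a mask whose columns come from
-- Python's negative-index wraparound (e.g. file -1 sets columns 7, 6 and 0); B sets only genuine
-- on-board columns of the span, which is the intended front-span value.
def D_get_pawn_front_span_mask (rank : Int) (file : Int) (color : String) : Prop :=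
  -7 ≤ file ∧ file ≤ -1 ∧
    (if color = "WHITE" then -9 ≤ rank ∧ rank ≤ 6 else 1 ≤ rank ∧ rank ≤ 8)
instance (rank : Int) (file : Int) (color : String) : Decidable (D_get_pawn_front_span_mask rank file color) := by unfold D_get_pawn_front_span_mask; infer_instance

def Spec_get_pawn_front_span_mask (rank : Int) (file : Int) (color : String) (out : Int) : Prop := ¬ D_get_pawn_front_span_mask rank file color → out = get_pawn_front_span_mask_alt rank file color
instance (rank : Int) (file : Int) (color : String) (out : Int) : Decidable (Spec_get_pawn_front_span_mask rank file color out) := by unfold Spec_get_pawn_front_span_mask; infer_instance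

def pvDiffWitness_get_pawn_front_span_mask : Int × Int × String := (5, -1, "WHITE")
def pvDiffWitnessOut_get_pawn_front_span_mask : Int × Int := (13961440319825248256, 72339069014638592)

-- ===== CLAIM (what is proved, stated in full; the proofs are below) =====
def Claim_unchanged_get_pawn_front_span_mask : Prop := ∀ (rank : Int) (file : Int) (color : String), Dom_get_pawn_front_span_mask rank file color → Pre_get_pawn_front_span_mask rank file color → Spec_get_pawn_front_span_mask rank file color (get_pawn_front_span_mask rank file color)
def Claim_changed_get_pawn_front_span_mask : Prop := Dom_get_pawn_front_span_mask (pvDiffWitness_get_pawn_front_span_mask.1) (pvDiffWitness_get_pawn_front_span_mask.2.1) (pvDiffWitness_get_pawn_front_span_mask.2.2) ∧ Pre_get_pawn_front_span_mask (pvDiffWitness_get_pawn_front_span_mask.1) (pvDiffWitness_get_pawn_front_span_mask.2.1) (pvDiffWitness_get_pawn_front_span_mask.2.2) ∧ D_get_pawn_front_span_mask (pvDiffWitness_get_pawn_front_span_mask.1) (pvDiffWitness_get_pawn_front_span_mask.2.1) (pvDiffWitness_get_pawn_front_span_mask.2.2) ∧ get_pawn_front_span_mask (pvDiffWitness_get_pawn_front_span_mask.1)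 (pvDiffWitness_get_pawn_front_span_mask.2.1) (pvDiffWitness_get_pawn_front_span_mask.2.2) = pvDiffWitnessOut_get_pawn_front_span_mask.1 ∧ get_pawn_front_span_mask_alt (pvDiffWitness_get_pawn_front_span_mask.1) (pvDiffWitness_get_pawn_front_span_mask.2.1) (pvDiffWitness_get_pawn_front_span_mask.2.2) = pvDiffWitnessOut_get_pawn_front_span_mask.2 ∧ pvDiffWitnessOut_get_pawn_front_span_mask.1 ≠ pvDiffWitnessOut_get_pawn_front_span_mask.2
def Claim_exact_get_pawn_front_span_mask : Prop := ∀ (rank : Int) (file : Int) (color : String), Dom_get_pawn_front_span_mask rank file color → Pre_get_pawn_front_span_mask rank file color → D_get_pawn_front_span_mask rank file color → get_pawn_front_span_mask rank file color ≠ get_pawn_front_span_mask_alt rank file color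

-- ===== LEMMAS AND PROOFS =====

lemma pv_ne : ¬ (("B" : String) = "WHITE") := by decide

-- any non-"WHITE" color takes the same branches as the fixed color "B"
lemma pv_color_A (rank file : Int) (c : String) (h : ¬ c = "WHITE") :
    get_pawn_front_span_mask rank file c = get_pawn_front_span_mask rank file "B" := by
  simp only [get_pawn_front_span_mask, get_pawn_front_attackspan_mask, if_neg h, if_neg pv_ne]

lemma pv_color_B (rank file : Int) (c : String) (h : ¬ c = "WHITE") :
    get_pawn_front_span_mask_alt rank file c = get_pawn_front_span_mask_alt rank file "B" := by
  simp only [get_pawn_front_span_mask_alt, if_neg h, if_neg pv_ne]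

lemma pv_A_white_hi (rank file : Int) (h : 7 ≤ rank) :
    get_pawn_front_span_mask rank file "WHITE" = 0 := by
  have h8 : PySem.List.pyRange (rank + 1) 8 1 = [] := PySem.List.pyRange_one_eq_nil (by omega)
  simp only [get_pawn_front_span_mask, get_pawn_front_attackspan_mask, reduceIte, h8,
    List.foldl_nil]
  decide

lemma pv_B_white_hi (rank file : Int) (h : 7 ≤ rank) :
    get_pawn_front_span_mask_alt rank file "WHITE" = 0 := by
  have h8 : PySem.List.pyRange (max (rank + 1) 0) (min (7 : Int) 7 + 1) 1 = [] :=
    PySem.List.pyRange_one_eq_nil (by omega)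
  simp only [get_pawn_front_span_mask_alt, reduceIte, h8, List.foldl_nil]

lemma pv_A_black_lo (rank file : Int) (h : rank ≤ 0) :
    get_pawn_front_span_mask rank file "B" = 0 := by
  have h8 : PySem.List.pyRange (rank + -1) (-1) (-1) = [] :=
    PySem.List.pyRange_neg_one_eq_nil (by omega)
  simp only [get_pawn_front_span_mask, get_pawn_front_attackspan_mask, if_neg pv_ne, h8,
    List.foldl_nil]
  decide

lemma pv_B_black_lo (rank file : Int) (h : rank ≤ 0) :
    get_pawn_front_span_mask_alt rank file "B" = 0 := by
  have h8 : PySem.List.pyRange (max (0 : Int) 0) (min (rank - 1) 7 + 1) 1 = [] :=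
    PySem.List.pyRange_one_eq_nil (by omega)
  simp only [get_pawn_front_span_mask_alt, if_neg pv_ne, h8, List.foldl_nil]

set_option maxRecDepth 1000000 in
lemma pv_white_main : ∀ r ∈ PySem.List.pyRange (-9) 7 1, ∀ f ∈ PySem.List.pyRange 0 8 1,
    get_pawn_front_span_mask r f "WHITE" = get_pawn_front_span_mask_alt r f "WHITE" := by decide

set_option maxRecDepth 1000000 in
lemma pv_black_main : ∀ r ∈ PySem.List.pyRange 1 9 1, ∀ f ∈ PySem.List.pyRange 0 8 1,
    get_pawn_front_span_mask r f "B" = get_pawn_front_span_mask_alt r f "B" := by decide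

set_option maxRecDepth 1000000 in
lemma pv_white_tight : ∀ r ∈ PySem.List.pyRange (-9) 7 1, ∀ f ∈ PySem.List.pyRange (-7) 0 1,
    get_pawn_front_span_mask r f "WHITE" ≠ get_pawn_front_span_mask_alt r f "WHITE" := by decide

set_option maxRecDepth 1000000 in
lemma pv_black_tight : ∀ r ∈ PySem.List.pyRange 1 9 1, ∀ f ∈ PySem.List.pyRange (-7) 0 1,
    get_pawn_front_span_mask r f "B" ≠ get_pawn_front_span_mask_alt r f "B" := by decide

lemma pv_mem (a b x : Int) (h1 : a ≤ x) (h2 : x < b) : x ∈ PySem.List.pyRange a b 1 :=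
  PySem.List.mem_pyRange_one.mpr ⟨h1, h2⟩

-- ===== VERDICT (by name: the statement is the Claim_ definition above) =====
theorem get_pawn_front_span_mask_spec : Claim_unchanged_get_pawn_front_span_mask := by
  intro rank file color _hdom hpre hnd
  by_cases hc : color = "WHITE"
  · subst hc
    simp only [Pre_get_pawn_front_span_mask, reduceIte] at hpre
    simp only [D_get_pawn_front_span_mask, reduceIte] at hnd
    by_cases hr : 7 ≤ rank
    · rw [pv_A_white_hi rank file hr, pv_B_white_hi rank file hr]
    · have hb : -9 ≤ rank ∧ -7 ≤ file ∧ file ≤ 7 := by omega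
      have hf : 0 ≤ file := by by_contra hf; exact hnd ⟨by omega, by omega, by omega, by omega⟩
      exact pv_white_main rank (pv_mem _ _ _ (by omega) (by omega)) file
        (pv_mem _ _ _ (by omega) (by omega))
  · rw [pv_color_A rank file color hc, pv_color_B rank file color hc]
    simp only [Pre_get_pawn_front_span_mask, if_neg hc] at hpre
    simp only [D_get_pawn_front_span_mask, if_neg hc] at hnd
    by_cases hr : rank ≤ 0
    · rw [pv_A_black_lo rank file hr, pv_B_black_lo rank file hr]
    · have hb : rank ≤ 8 ∧ -7 ≤ file ∧ file ≤ 7 := by omega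
      have hf : 0 ≤ file := by by_contra hf; exact hnd ⟨by omega, by omega, by omega, by omega⟩
      exact pv_black_main rank (pv_mem _ _ _ (by omega) (by omega)) file
        (pv_mem _ _ _ (by omega) (by omega))

set_option maxRecDepth 1000000 in
theorem get_pawn_front_span_mask_changed : Claim_changed_get_pawn_front_span_mask := by
  unfold Claim_changed_get_pawn_front_span_mask; decide

theorem get_pawn_front_span_mask_tight : Claim_exact_get_pawn_front_span_mask := by
  intro rank file color _hdom _hpre hd
  by_cases hc : color = "WHITE"
  · subst hc
    simp only [D_get_pawn_front_span_mask, reduceIte] at hd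
    exact pv_white_tight rank (pv_mem _ _ _ (by omega) (by omega)) file
      (pv_mem _ _ _ (by omega) (by omega))
  · rw [pv_color_A rank file color hc, pv_color_B rank file color hc]
    simp only [D_get_pawn_front_span_mask, if_neg hc] at hd
    exact pv_black_tight rank (pv_mem _ _ _ (by omega) (by omega)) file
      (pv_mem _ _ _ (by omega) (by omega))
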